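-- pv_equiv track=rewrite | github.com/nishantsharma/xml.ai | src/DeepInXML/hier2hier/models/hier2hierBatch.py | packed2ObjIndices
-- ===== SOURCE A (Python) =====
-- def packed2ObjIndices(decreasingObjLengths):
--     # Build linear2PackedIndex.
--     packedIndex = 0
--     objCount = len(decreasingObjLengths)
--     if not objCount:
--         return []
--     packedLength = sum(decreasingObjLengths)
--     maxObjLength = decreasingObjLengths[0]
--     packed2ObjIndices = [None for _ in range(packedLength)]
--     for indexWithinObj in range(maxObjLength):
--         for objIndex in range(objCount):
--             if indexWithinObj >= decreasingObjLengths[objIndex]: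
--                 # This tree doesn't have any more nodes.
--                 break
--             packed2ObjIndices[packedIndex] = objIndex
--             packedIndex += 1
--
--     return packed2ObjIndices
-- ===== SOURCE B (Python) =====
-- def packed2ObjIndices(decreasingObjLengths):
--     # Tabulate per-depth widths with a difference array, then emit each row as a range.
--     if not decreasingObjLengths:
--         return []
--     maxObjLength = decreasingObjLengths[0]
--     diff = [0] * (maxObjLength + 1)
--     for objLength in decreasingObjLengths:
--         diff[0] += 1
--         diff[objLength] -= 1
--     out = []
--     width = 0
--     for depth in range(maxObjLength):
--         width += diff[depth]
--         out.extend(range(width))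
--     return out
-- ===== Notes on version B (the rewrite author's own statement) =====
-- stated objective: alternative
-- what changed: B replaces A's preallocated None-array and per-row object rescan with break by a difference-array width table (one pass over the lengths) whose prefix sums give each row's width, emitting each row directly as range(width).
-- outside the precondition, e.g. on packed2ObjIndices([1, 0, 1]): A returns [0, None], B returns [0, 1]; on packed2ObjIndices([1, 2]): A returns [0, 1, None], B raises IndexError
import Mathlib
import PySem

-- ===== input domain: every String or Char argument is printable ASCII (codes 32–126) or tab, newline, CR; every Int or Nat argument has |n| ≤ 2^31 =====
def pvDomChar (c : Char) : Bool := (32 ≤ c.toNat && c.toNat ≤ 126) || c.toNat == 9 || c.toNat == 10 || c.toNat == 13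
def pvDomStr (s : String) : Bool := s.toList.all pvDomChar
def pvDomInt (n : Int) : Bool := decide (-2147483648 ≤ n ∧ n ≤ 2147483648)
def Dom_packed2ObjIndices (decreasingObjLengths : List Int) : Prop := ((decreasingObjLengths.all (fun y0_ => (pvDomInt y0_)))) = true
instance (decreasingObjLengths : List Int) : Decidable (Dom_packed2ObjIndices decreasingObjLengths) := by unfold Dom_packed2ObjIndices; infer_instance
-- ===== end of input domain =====

-- B builds a difference-array width table and emits each row as a range, instead of A's
-- preallocated None-array filled by a per-row rescan with break (alternative decomposition, same cost).


-- ===== PORT A =====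
-- inner 'for objIndex in range(objCount)' with its break; lengths[objIndex] is in range
-- for every visited objIndex, so List.getD is exact there.
def pAInner (lengths : List Int) (r : Int) : List Nat → List Int × Nat → List Int × Nat
  | [], st => st
  | j :: js, (arr, pi) =>
    if lengths.getD j 0 ≤ r then (arr, pi)
    else pAInner lengths r js (arr.set pi (Int.ofNat j), pi + 1)

-- Under Pre_ the packed length is nonnegative and every cell is overwritten, so the
-- Python 'None' placeholder is represented by 0 (never observable on Pre_).
def packed2ObjIndices (decreasingObjLengths : List Int) : List Int :=
  let objCount := decreasingObjLengths.length
  if objCount = 0 then [] else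
  let packedLength := decreasingObjLengths.sum
  let maxObjLength := decreasingObjLengths.headD 0
  let init := List.replicate packedLength.toNat (0 : Int)
  ((PySem.List.pyRange 0 maxObjLength 1).foldl
      (fun st r => pAInner decreasingObjLengths r (List.range objCount) st)
      (init, 0)).1

-- ===== PORT B =====
-- diff[0] += 1; diff[objLength] -= 1, with Python's negative-index rule via pyGetD/pySetD
-- (total forms; under Pre_ every index is in range, so they are exact there).
def pBDiffStep (d : List Int) (objLength : Int) : List Int :=
  let d' := PySem.List.pySetD d 0 (PySem.List.pyGetD d 0 0 + 1)
  PySem.List.pySetD d' objLength (PySem.List.pyGetD d' objLength 0 - 1)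

def packed2ObjIndices_alt (decreasingObjLengths : List Int) : List Int :=
  match decreasingObjLengths with
  | [] => []
  | maxObjLength :: rest =>
    let diff := (maxObjLength :: rest).foldl pBDiffStep
        (List.replicate (maxObjLength + 1).toNat (0 : Int))
    ((PySem.List.pyRange 0 maxObjLength 1).foldl
        (fun (st : List Int × Int) r =>
          let w := st.2 + diff.getD r.toNat 0
          (st.1 ++ PySem.List.pyRange 0 w 1, w))
        ([], 0)).1

-- ===== PRECONDITION & SPEC =====
-- Pre_ excludes lists that are not nonincreasing sequences of nonnegative lengths: there A
-- either raises an IndexError or returns a list still containing None, which is not a value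
-- of the declared List Int type.
def Pre_packed2ObjIndices (decreasingObjLengths : List Int) : Prop :=
  List.Pairwise (fun a b => a ≥ b) decreasingObjLengths ∧ ∀ x ∈ decreasingObjLengths, 0 ≤ x
instance (decreasingObjLengths : List Int) : Decidable (Pre_packed2ObjIndices decreasingObjLengths) := by unfold Pre_packed2ObjIndices; infer_instance

def pvWitness_packed2ObjIndices : List Int := [3, 2, 2, 0]

def Spec_packed2ObjIndices (decreasingObjLengths : List Int) (out : List Int) : Prop := out = packed2ObjIndices_alt decreasingObjLengths
instance (decreasingObjLengths : List Int) (out : List Int) : Decidable (Spec_packed2ObjIndices decreasingObjLengths out) := by unfold Spec_packed2ObjIndices; infer_instance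

-- ===== CLAIM (what is proved, stated in full; the proofs are below) =====
def Claim_equal_packed2ObjIndices : Prop := ∀ (decreasingObjLengths : List Int), Dom_packed2ObjIndices decreasingObjLengths → Pre_packed2ObjIndices decreasingObjLengths → Spec_packed2ObjIndices decreasingObjLengths (packed2ObjIndices decreasingObjLengths)

-- ===== LEMMAS AND PROOFS =====

def pvWriteRun (arr : List Int) (pi : Nat) : List Int → List Int
  | [] => arr
  | v :: vs => pvWriteRun (arr.set pi v) (pi + 1) vs

theorem pvWriteRun_eq (vs : List Int) : ∀ (arr : List Int) (pi : Nat), pi + vs.length ≤ arr.length →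
    pvWriteRun arr pi vs = arr.take pi ++ vs ++ arr.drop (pi + vs.length) := by
  induction vs with
  | nil => intro arr pi h; simp [pvWriteRun]
  | cons v vs ih =>
    intro arr pi h
    simp only [List.length_cons] at h
    have hpi : pi < arr.length := by omega
    rw [pvWriteRun, ih _ _ (by simp; omega)]
    have htake : (arr.set pi v).take (pi + 1) = arr.take pi ++ [v] := by
      rw [List.take_set, List.take_add_one]
      have : arr[pi]? = some arr[pi] := List.getElem?_eq_getElem hpi
      rw [this]
      rw [List.set_append]
      simp [List.length_take, Nat.min_eq_left (le_of_lt hpi)]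
    have hdrop : (arr.set pi v).drop (pi + 1 + vs.length) = arr.drop (pi + 1 + vs.length) := by
      rw [List.drop_set, if_pos (by omega)]
    rw [htake, hdrop]
    simp only [List.length_cons, List.append_assoc, List.cons_append, List.singleton_append,
      List.nil_append]
    have : pi + 1 + vs.length = pi + (vs.length + 1) := by omega
    rw [this]

theorem pvWriteRun_append (v1 v2 : List Int) : ∀ arr pi,
    pvWriteRun arr pi (v1 ++ v2) = pvWriteRun (pvWriteRun arr pi v1) (pi + v1.length) v2 := by
  induction v1 with
  | nil => intro arr pi; simp [pvWriteRun]
  | cons v vs ih => intro arr pi; simp [pvWriteRun, ih]; ring_nf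

theorem pAInner_eq (l : List Int) (r : Int) : ∀ (js : List Nat) (arr : List Int) (pi : Nat),
    pAInner l r js (arr, pi) =
      (pvWriteRun arr pi ((js.takeWhile (fun j => decide (r < l.getD j 0))).map Int.ofNat),
        pi + (js.takeWhile (fun j => decide (r < l.getD j 0))).length) := by
  intro js
  induction js with
  | nil => intro arr pi; simp [pAInner, pvWriteRun, List.takeWhile]
  | cons j js ih =>
    intro arr pi
    rw [List.takeWhile_cons]
    by_cases h : l.getD j 0 ≤ r
    · have hd : (decide (r < l.getD j 0)) = false := decide_eq_false (by omega)
      rw [hd]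
      simp only [pAInner, if_pos h]
      simp [pvWriteRun]
    · have hd : (decide (r < l.getD j 0)) = true := decide_eq_true (by omega)
      rw [hd]
      simp only [pAInner, if_neg h]
      rw [ih]
      simp [pvWriteRun]
      omega

theorem pvTakeWhile_range' (q : Nat → Bool) : ∀ (k a m : Nat), m ≤ k →
    (∀ i, i < m → q (a + i) = true) → (m < k → q (a + m) = false) →
    (List.range' a k).takeWhile q = List.range' a m := by
  intro k
  induction k with
  | zero => intro a m hm _ _; interval_cases m; rfl
  | succ k ih =>
    intro a m hm h1 h2
    rw [List.range'_succ, List.takeWhile_cons]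
    cases m with
    | zero =>
      have := h2 (by omega)
      simp at this ⊢
      simpa using this
    | succ m =>
      have hq : q a = true := by simpa using h1 0 (by omega)
      rw [hq]
      simp only [List.range'_succ, if_true, decide_true]
      congr 1
      refine ih (a+1) m (by omega) ?_ ?_
      · intro i hi; have := h1 (i+1) (by omega)
        simpa [Nat.add_comm, Nat.add_assoc, Nat.add_left_comm] using this
      · intro hlt; have := h2 (by omega)
        simpa [Nat.add_comm, Nat.add_assoc, Nat.add_left_comm] using this

theorem pvCountP_eq_takeWhile (r : Int) : ∀ (l : List Int), List.Pairwise (fun a b => a ≥ b) l →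
    l.countP (fun L => decide (r < L)) = (l.takeWhile (fun L => decide (r < L))).length := by
  intro l
  induction l with
  | nil => intro _; rfl
  | cons a l ih =>
    intro hp
    rw [List.pairwise_cons] at hp
    by_cases h : r < a
    · simp [List.countP_cons, List.takeWhile_cons, h, ih hp.2]
    · have hz : l.countP (fun L => decide (r < L)) = 0 := by
        rw [List.countP_eq_zero]
        intro x hx
        have : a ≥ x := hp.1 x hx
        simp; omega
      simp [List.countP_cons, List.takeWhile_cons, h, hz]

theorem pvHead_dropWhile (p : Int → Bool) : ∀ (l : List Int) (x : Int) (xs : List Int),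
    l.dropWhile p = x :: xs → p x = false := by
  intro l
  induction l with
  | nil => intro x xs h; simp [List.dropWhile] at h
  | cons a l ih =>
    intro x xs h
    rw [List.dropWhile_cons] at h
    by_cases hp : p a
    · simp [hp] at h; exact ih x xs h
    · simp [hp] at h; rw [← h.1]; simpa using hp

def pvW (l : List Int) (r : Int) : Nat := l.countP (fun L => decide (r < L))

theorem pvTakeWhile_range (l : List Int) (r : Int) (hp : List.Pairwise (fun a b => a ≥ b) l) :
    (List.range l.length).takeWhile (fun j => decide (r < l.getD j 0)) = List.range (pvW l r) := by
  have hw := pvCountP_eq_takeWhile r l hp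
  set p : Int → Bool := fun L => decide (r < L) with hpdef
  set w : Nat := (l.takeWhile p).length with hwdef
  have hwle : w ≤ l.length := by
    rw [hwdef]; exact (List.takeWhile_prefix p).length_le
  rw [List.range_eq_range', List.range_eq_range']
  have : pvW l r = w := hw
  rw [this]
  apply pvTakeWhile_range' _ _ _ _ hwle
  · intro i hi
    simp only [Nat.zero_add]
    have hil : i < l.length := lt_of_lt_of_le hi hwle
    have hgd : l.getD i 0 = l[i] := List.getD_eq_getElem l 0 hil
    have : l[i] = (l.takeWhile p)[i]'(by omega) := ((List.takeWhile_prefix p).getElem (i := i) (by omega)).symm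
    have hmem : (l.takeWhile p)[i]'(by omega) ∈ l.takeWhile p := List.getElem_mem _
    have := List.mem_takeWhile_imp hmem
    simp only [hgd, ‹l[i] = _›]
    exact this
  · intro hlt
    simp only [Nat.zero_add]
    have hgd : l.getD w 0 = l[w] := List.getD_eq_getElem l 0 hlt
    have hsplit : l.takeWhile p ++ l.dropWhile p = l := List.takeWhile_append_dropWhile
    have hdlen : w + (l.dropWhile p).length = l.length := by
      have := congrArg List.length hsplit
      rw [List.length_append] at this
      rw [hwdef]; exact this
    obtain ⟨x, xs, hx⟩ : ∃ x xs, l.dropWhile p = x :: xs := by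
      cases hcase : l.dropWhile p with
      | nil => rw [hcase] at hdlen; simp at hdlen; omega
      | cons x xs => exact ⟨x, xs, rfl⟩
    have hxval : l[w] = x := by
      have h1 : l[w]? = some x := by
        conv_lhs => rw [← hsplit]
        rw [List.getElem?_append_right (by omega)]
        simp [hx, hwdef]
      have h2 : l[w]? = some (l[w]) := List.getElem?_eq_getElem hlt
      rw [h1] at h2; exact (Option.some_injective _ h2).symm
    rw [hgd, hxval]
    exact pvHead_dropWhile p l x xs hx

theorem pvSum_map_add (f g : Nat → Nat) : ∀ xs : List Nat,
    (xs.map (fun x => f x + g x)).sum = (xs.map f).sum + (xs.map g).sum := by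
  intro xs; induction xs with
  | nil => rfl
  | cons x xs ih => simp [ih]; omega

theorem pvSum_map_add_int (f g : Nat → Int) : ∀ xs : List Nat,
    (xs.map (fun x => f x + g x)).sum = (xs.map f).sum + (xs.map g).sum := by
  intro xs; induction xs with
  | nil => rfl
  | cons x xs ih => simp [ih]; ring

theorem pvSum_ite_min (a : Int) : ∀ M : Nat,
    ((List.range M).map (fun (k : Nat) => if ((k : Int)) < a then (1 : Nat) else 0)).sum = min a.toNat M := by
  intro M; induction M with
  | zero => simp
  | succ M ih =>
    rw [List.range_succ]
    simp only [List.map_append, List.sum_append, ih, List.map_cons, List.map_nil]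
    by_cases h : ((M : Int)) < a
    · rw [if_pos h]; simp; omega
    · rw [if_neg h]; simp; omega

theorem pvSumW (M : Nat) : ∀ l : List Int, (∀ L ∈ l, 0 ≤ L ∧ L ≤ (M : Int)) →
    ((List.range M).map (fun (k : Nat) => pvW l ((k : Int)))).sum = (l.map Int.toNat).sum := by
  intro l
  induction l with
  | nil => intro _; simp [pvW]
  | cons a tl ih =>
    intro h
    have ha := h a (by simp)
    have htl := fun L hL => h L (List.mem_cons_of_mem _ hL)
    have hstep : (fun k : Nat => pvW (a :: tl) ((k : Int)))
        = fun k : Nat => pvW tl (k : Int) + (if ((k : Int)) < a then 1 else 0) := by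
      funext k
      simp [pvW, List.countP_cons]
    rw [hstep, pvSum_map_add, ih htl, pvSum_ite_min]
    simp only [List.map_cons, List.sum_cons]
    omega

theorem pvSum_toNat : ∀ l : List Int, (∀ L ∈ l, 0 ≤ L) → ((l.map Int.toNat).sum : Int) = l.sum := by
  intro l
  induction l with
  | nil => intro _; simp
  | cons a tl ih =>
    intro h
    have := ih (fun L hL => h L (List.mem_cons_of_mem _ hL))
    have ha := h a (by simp)
    simp only [List.map_cons, List.sum_cons, Nat.cast_add]
    rw [this]
    omega

def pBDiffStepN (d : List Int) (objLength : Int) : List Int :=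
  let d' := d.set 0 (d.getD 0 0 + 1)
  d'.set objLength.toNat (d'.getD objLength.toNat 0 - 1)

theorem pBDiffStep_length (d : List Int) (L : Int) : (pBDiffStep d L).length = d.length := by
  simp [pBDiffStep, PySem.List.length_pySetD]

theorem pBDiffStep_eq (d : List Int) (L : Int) (hL0 : 0 ≤ L) :
    pBDiffStep d L = pBDiffStepN d L := by
  simp only [pBDiffStep]
  rw [PySem.List.pyGetD_of_nonneg _ _ (le_refl (0 : Int)),
    PySem.List.pySetD_of_nonneg _ _ (le_refl (0 : Int)),
    PySem.List.pyGetD_of_nonneg _ _ hL0, PySem.List.pySetD_of_nonneg _ _ hL0]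
  simp [pBDiffStepN]

theorem pvGetD_set (d : List Int) (n i : Nat) (a : Int) :
    (d.set n a).getD i 0 = if n = i ∧ n < d.length then a else d.getD i 0 := by
  simp only [List.getD_eq_getElem?_getD, List.getElem?_set]
  by_cases h1 : n = i
  · subst h1
    by_cases h2 : n < d.length
    · rw [if_pos rfl, if_pos h2, if_pos ⟨rfl, h2⟩]; rfl
    · rw [if_pos rfl, if_neg h2, if_neg (by tauto)]
      rw [List.getElem?_eq_none (by omega)]
  · rw [if_neg h1, if_neg (by tauto)]

theorem pBDiffStepN_getD (d : List Int) (L : Int) (i : Nat)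
    (hL0 : 0 ≤ L) (hL : L.toNat < d.length) (hi : i < d.length) :
    (pBDiffStepN d L).getD i 0
      = d.getD i 0 + (if i = 0 then 1 else 0) - (if L = (i : Int) then 1 else 0) := by
  by_cases hz : i = 0
  · subst hz
    by_cases he : L.toNat = 0
    · simp only [pBDiffStepN, pvGetD_set, List.length_set, he, eq_self_iff_true, true_and, and_true]
      split_ifs <;> omega
    · simp only [pBDiffStepN, pvGetD_set, List.length_set, eq_self_iff_true, true_and, and_true]
      split_ifs <;> omega
  · by_cases he : L.toNat = i
    · subst he
      simp only [pBDiffStepN, pvGetD_set, List.length_set, eq_self_iff_true, true_and, and_true]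
      split_ifs <;> omega
    · simp only [pBDiffStepN, pvGetD_set, List.length_set, eq_self_iff_true, true_and, and_true]
      split_ifs <;> omega

theorem pvDiff_fold (M : Nat) : ∀ (p : List Int) (d : List Int), d.length = M + 1 →
    (∀ L ∈ p, 0 ≤ L ∧ L ≤ (M : Int)) → ∀ i, i ≤ M →
    (p.foldl pBDiffStep d).getD i 0
      = d.getD i 0 + (if i = 0 then (p.length : Int) else 0)
        - (p.countP (fun L => decide (L = (i : Int))) : Int) := by
  intro p
  induction p with
  | nil => intro d hd hp i hi; simp
  | cons L p ih =>
    intro d hd hp i hi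
    have hL := hp L (by simp)
    have hstep : (pBDiffStep d L).length = M + 1 := by rw [pBDiffStep_length]; exact hd
    rw [List.foldl_cons, ih (pBDiffStep d L) hstep (fun x hx => hp x (List.mem_cons_of_mem _ hx)) i hi]
    rw [pBDiffStep_eq d L hL.1, pBDiffStepN_getD d L i hL.1 (by omega) (by omega)]
    rw [List.countP_cons]
    simp only [List.length_cons, decide_eq_true_eq]
    split_ifs <;> push_cast <;> omega

theorem pvSum_map_sub_int (f g : Nat → Int) : ∀ xs : List Nat,
    (xs.map (fun x => f x - g x)).sum = (xs.map f).sum - (xs.map g).sum := by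
  intro xs; induction xs with
  | nil => rfl
  | cons x xs ih => simp [ih]; ring

theorem pvSum_ite_zero (n : Int) : ∀ m : Nat, 0 < m →
    ((List.range m).map (fun (i : Nat) => if i = 0 then n else 0)).sum = n := by
  intro m
  induction m with
  | zero => intro h; omega
  | succ m ih =>
    intro _
    rw [List.range_succ]
    cases m with
    | zero => simp
    | succ m =>
      simp only [List.map_append, List.sum_append, ih (by omega), List.map_cons, List.map_nil]
      rw [if_neg (by omega)]
      simp

theorem pvSum_cnt_single (L : Int) : ∀ m : Nat,
    ((List.range m).map (fun (i : Nat) => if L = (i : Int) then (1 : Int) else 0)).sum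
      = if 0 ≤ L ∧ L < (m : Int) then 1 else 0 := by
  intro m
  induction m with
  | zero =>
    simp only [List.range_zero, List.map_nil, List.sum_nil, Nat.cast_zero]
    rw [if_neg (by omega)]
  | succ m ih =>
    rw [List.range_succ]
    simp only [List.map_append, List.sum_append, ih, List.map_cons, List.map_nil]
    push_cast
    split_ifs <;> simp <;> omega

theorem pvSum_cnt (m : Nat) : ∀ l : List Int,
    ((List.range m).map (fun (i : Nat) => (l.countP (fun L => decide (L = (i : Int))) : Int))).sum
      = (l.countP (fun L => decide (0 ≤ L ∧ L < (m : Int))) : Int) := by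
  intro l
  induction l with
  | nil => simp
  | cons a tl ih =>
    have hsplit : (fun (i : Nat) => ((a :: tl).countP (fun L => decide (L = (i : Int))) : Int))
        = fun (i : Nat) => (tl.countP (fun L => decide (L = (i : Int))) : Int)
            + (if a = (i : Int) then (1 : Int) else 0) := by
      funext i
      rw [List.countP_cons]
      by_cases h : a = (i : Int) <;> simp [h]
    rw [hsplit, pvSum_map_add_int, ih, pvSum_cnt_single, List.countP_cons]
    by_cases h : 0 ≤ a ∧ a < (m : Int) <;> simp [h]

theorem pvW_from_count (k : Nat) : ∀ l : List Int, (∀ L ∈ l, 0 ≤ L) →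
    (l.countP (fun L => decide (0 ≤ L ∧ L < ((k : Int) + 1))) : Int)
      = (l.length : Int) - (pvW l (k : Int) : Int) := by
  intro l
  induction l with
  | nil => simp [pvW]
  | cons a tl ih =>
    intro h
    have ha := h a (by simp)
    have := ih (fun L hL => h L (List.mem_cons_of_mem _ hL))
    simp only [pvW, List.countP_cons, List.length_cons] at *
    by_cases hc : (k : Int) < a
    · rw [if_neg (by simp; omega), if_pos (by simp; omega)]
      push_cast
      omega
    · rw [if_pos (by simp; omega), if_neg (by simp; omega)]
      push_cast
      omega

-- prefix sums of the diff table give the row widths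
theorem pvSS (l : List Int) (M : Nat) (hlen0 : 0 < l.length)
    (hb : ∀ L ∈ l, 0 ≤ L ∧ L ≤ (M : Int)) (k : Nat) (hk : k < M) :
    ((List.range (k + 1)).map
        (fun (i : Nat) => (l.foldl pBDiffStep (List.replicate (M + 1) (0 : Int))).getD i 0)).sum
      = (pvW l (k : Int) : Int) := by
  have hgd : ∀ i : Nat, i ≤ M →
      (l.foldl pBDiffStep (List.replicate (M + 1) (0 : Int))).getD i 0
        = (if i = 0 then (l.length : Int) else 0)
          - (l.countP (fun L => decide (L = (i : Int))) : Int) := by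
    intro i hi
    rw [pvDiff_fold M l (List.replicate (M + 1) (0 : Int)) (by simp) hb i hi]
    rw [List.getD_eq_getElem?_getD, List.getElem?_replicate]
    rw [if_pos (by omega)]
    simp
  have hmap : (List.range (k + 1)).map
        (fun (i : Nat) => (l.foldl pBDiffStep (List.replicate (M + 1) (0 : Int))).getD i 0)
      = (List.range (k + 1)).map
        (fun (i : Nat) => (if i = 0 then (l.length : Int) else 0)
          - (l.countP (fun L => decide (L = (i : Int))) : Int)) := by
    apply List.map_congr_left
    intro i hi
    rw [List.mem_range] at hi
    exact hgd i (by omega)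
  rw [hmap, pvSum_map_sub_int, pvSum_ite_zero _ _ (by omega), pvSum_cnt]
  push_cast
  rw [pvW_from_count k l (fun L hL => (hb L hL).1)]
  ring

-- the B fold emits one range per row, accumulating the prefix sum
theorem pvBFold (diff : List Int) : ∀ m : Nat,
    (List.range m).foldl
        (fun (st : List Int × Int) (k : Nat) =>
          (st.1 ++ PySem.List.pyRange 0 (st.2 + diff.getD k 0) 1, st.2 + diff.getD k 0))
        ([], 0)
      = ((List.range m).flatMap
            (fun (k : Nat) => PySem.List.pyRange 0
              (((List.range (k + 1)).map (fun (i : Nat) => diff.getD i 0)).sum) 1),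
          ((List.range m).map (fun (i : Nat) => diff.getD i 0)).sum) := by
  intro m
  induction m with
  | zero => simp
  | succ m ih =>
    rw [List.range_succ, List.foldl_append, ih]
    simp only [List.foldl_cons, List.foldl_nil, List.flatMap_append, List.map_append,
      List.sum_append, List.flatMap_cons, List.flatMap_nil, List.map_cons, List.map_nil,
      List.sum_cons, List.append_nil, List.sum_nil]
    have hS : ((List.range (m + 1)).map (fun (i : Nat) => diff.getD i 0)).sum
        = ((List.range m).map (fun (i : Nat) => diff.getD i 0)).sum + diff.getD m 0 := by
      rw [List.range_succ]; simp
    rw [hS]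
    simp

-- the A fold writes each row's values consecutively
theorem pvAFold (V : Nat → List Int) (f : List Int × Nat → Nat → List Int × Nat)
    (hf : ∀ arr pi k, f (arr, pi) k = (pvWriteRun arr pi (V k), pi + (V k).length)) :
    ∀ (ks : List Nat) (arr : List Int) (pi : Nat),
      ks.foldl f (arr, pi) = (pvWriteRun arr pi (ks.flatMap V), pi + (ks.flatMap V).length) := by
  intro ks
  induction ks with
  | nil => intro arr pi; simp [pvWriteRun]
  | cons k ks ih =>
    intro arr pi
    rw [List.foldl_cons, hf, ih]
    rw [List.flatMap_cons, pvWriteRun_append]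
    simp [Nat.add_assoc]
-- inner 'for objIndex in range(objCount)' with its break; lengths[objIndex] is in range
-- for every visited objIndex, so List.getD is exact there.
theorem pvRange_cast (m : Int) (hm : 0 ≤ m) :
    PySem.List.pyRange 0 m 1 = (List.range m.toNat).map (fun (k : Nat) => ((k : Int))) := by
  rw [PySem.List.pyRange_one]
  simp

theorem pvMain (l : List Int) (hs : List.Pairwise (fun a b => a ≥ b) l) (hn : ∀ x ∈ l, 0 ≤ x) :
    packed2ObjIndices l = packed2ObjIndices_alt l := by
  cases l with
  | nil => rfl
  | cons m rest =>
    set l := m :: rest with hl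
    have hm0 : 0 ≤ m := hn m (by simp [hl])
    set M : Nat := m.toNat with hM
    have hmc : ((M : Int)) = m := by omega
    have hb : ∀ L ∈ l, 0 ≤ L ∧ L ≤ (M : Int) := by
      intro L hL
      refine ⟨hn L hL, ?_⟩
      rw [hmc]
      rcases List.mem_cons.mp hL with h | h
      · omega
      · have := (List.pairwise_cons.mp hs).1 L h
        omega
    set V : Nat → List Int := fun k => (List.range (pvW l (k : Int))).map (fun (j : Nat) => ((j : Int))) with hV
    set AV : List Int := (List.range M).flatMap V with hAV
    -- A side
    have hA : packed2ObjIndices l = AV := by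
      rw [packed2ObjIndices]
      rw [if_neg (by simp [hl])]
      change (((PySem.List.pyRange 0 (l.headD 0) 1).foldl
          (fun st r => pAInner l r (List.range l.length) st)
          (List.replicate l.sum.toNat 0, 0)).1) = AV
      have hhead : l.headD 0 = m := by rw [hl]; rfl
      rw [hhead, pvRange_cast m hm0, List.foldl_map, ← hmc]
      rw [Int.toNat_natCast]
      have hf : ∀ (st : List Int × Nat) (k : Nat),
          pAInner l ((k : Int)) (List.range l.length) st = (pvWriteRun st.1 st.2 (V k), st.2 + (V k).length) := by
        intro st k
        obtain ⟨arr, pi⟩ := st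
        rw [pAInner_eq, pvTakeWhile_range l ((k : Int)) hs]
        simp [hV]
        rfl
      have := pvAFold V (fun st k => pAInner l ((k : Int)) (List.range l.length) st)
        (fun arr pi k => hf (arr, pi) k) (List.range M) (List.replicate l.sum.toNat 0) 0
      rw [this]
      have hlenAV : AV.length = l.sum.toNat := by
        rw [hAV, List.length_flatMap]
        have h1 : ((List.range M).map (fun k => (V k).length)).sum
            = ((List.range M).map (fun (k : Nat) => pvW l ((k : Int)))).sum := by
          congr 1
          apply List.map_congr_left
          intro k _
          simp [hV]
        rw [h1, pvSumW M l hb]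
        have := pvSum_toNat l hn
        omega
      rw [pvWriteRun_eq AV _ 0 (by simp [hlenAV])]
      simp [hlenAV, List.drop_length]
    -- B side
    have hB : packed2ObjIndices_alt l = AV := by
      rw [hl, packed2ObjIndices_alt]
      have h1 : (m + 1).toNat = M + 1 := by omega
      rw [h1, ← hl]
      rw [pvRange_cast m hm0, List.foldl_map, ← hmc, Int.toNat_natCast]
      have hfix : (fun (st : List Int × Int) (k : Nat) =>
            (st.1 ++ PySem.List.pyRange 0 (st.2 + (l.foldl pBDiffStep (List.replicate (M + 1) (0:Int))).getD ((k : Int)).toNat 0) 1,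
             st.2 + (l.foldl pBDiffStep (List.replicate (M + 1) (0:Int))).getD ((k : Int)).toNat 0))
          = fun (st : List Int × Int) (k : Nat) =>
            (st.1 ++ PySem.List.pyRange 0 (st.2 + (l.foldl pBDiffStep (List.replicate (M + 1) (0:Int))).getD k 0) 1,
             st.2 + (l.foldl pBDiffStep (List.replicate (M + 1) (0:Int))).getD k 0) := by
        funext st k
        rw [Int.toNat_natCast]
      rw [hfix, pvBFold]
      have hrow : ∀ k ∈ List.range M,
          PySem.List.pyRange 0
              (((List.range (k + 1)).map
                (fun (i : Nat) => (l.foldl pBDiffStep (List.replicate (M + 1) (0:Int))).getD i 0)).sum) 1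
            = V k := by
        intro k hk
        rw [pvSS l M (by simp [hl]) hb k (List.mem_range.mp hk)]
        rw [pvRange_cast _ (Int.natCast_nonneg _), Int.toNat_natCast]
      rw [hAV, List.flatMap_def, List.flatMap_def, List.map_congr_left hrow]
    rw [hA, hB]

-- ===== VERDICT (by name: the statement is the Claim_ definition above) =====
theorem packed2ObjIndices_spec : Claim_equal_packed2ObjIndices := by
  intro l _ hpre
  unfold Spec_packed2ObjIndices
  exact pvMain l hpre.1 hpre.2
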